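-- pv_equiv track=rewrite | github.com/MarianCTH/UBB-Computer-science | Semester 1/Fundamentals of Programming/a5-MarianCTH-main/src/naive/program.py | digits_of_number
-- ===== SOURCE A (Python) =====
-- def digits_of_number(number):
--     digits_complex_number = 0
--     frequency_list = [0, 0, 0, 0, 0, 0, 0, 0, 0, 0]
--     for index in number:
--         if (index < 0):
--             index = index * (-1)
--         while (index > 0):
--             frequency_list[index % 10] = 1
--             index //= 10
--     for index in range(1, 10):
--         if (frequency_list[index] == 1):
--             digits_complex_number = digits_complex_number * 10 + index
--     return digits_complex_number
-- ===== SOURCE B (Python) =====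
-- def digits_of_number(number):
--     result = 0
--     for d in "123456789":
--         if any(d in str(abs(n)) for n in number):
--             result = result * 10 + int(d)
--     return result
-- ===== Notes on version B (the rewrite author's own statement) =====
-- stated objective: simpler
-- what changed: Inverts the loop structure to digit-major: instead of decomposing every number into digits and marking a frequency array, B asks for each candidate digit 1..9 whether it occurs as a character in str(abs(n)) of any number (any() short-circuits at the first hit), appending it directly to the result; no frequency array, set or per-number digit loop exists.
import Mathlib
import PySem

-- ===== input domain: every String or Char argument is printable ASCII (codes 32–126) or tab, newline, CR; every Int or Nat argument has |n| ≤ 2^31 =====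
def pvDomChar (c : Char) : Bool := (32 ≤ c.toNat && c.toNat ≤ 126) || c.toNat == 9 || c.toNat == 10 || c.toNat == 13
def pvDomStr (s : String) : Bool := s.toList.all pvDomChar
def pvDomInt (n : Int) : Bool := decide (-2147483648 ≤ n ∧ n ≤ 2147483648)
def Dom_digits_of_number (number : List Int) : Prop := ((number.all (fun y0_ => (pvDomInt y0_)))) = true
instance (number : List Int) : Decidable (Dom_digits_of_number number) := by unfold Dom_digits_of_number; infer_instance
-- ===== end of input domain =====

-- B inverts the loop structure to digit-major: for each candidate digit 1..9 it tests whether the digit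
-- occurs as a character of str(abs(n)) for some n, with no frequency array or per-number digit loop (objective: simpler).

-- ===== PORT A =====
-- the inner 'while (index > 0)' loop of A
def pvAWhile (idx : Int) (freq : List Int) : List Int :=
  if _h : 0 < idx then
    pvAWhile (PySem.Int.floordiv idx 10) (PySem.List.pySetD freq (PySem.Int.mod idx 10) 1)
  else freq
termination_by idx.toNat
decreasing_by
  rw [PySem.Int.floordiv_eq_ediv_of_pos (by norm_num)]
  omega

def digits_of_number (number : List Int) : Int :=
  let frequency_list : List Int := [0, 0, 0, 0, 0, 0, 0, 0, 0, 0]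
  let frequency_list := number.foldl (fun freq index =>
    pvAWhile (if index < 0 then index * (-1) else index) freq) frequency_list
  (PySem.List.pyRange 1 10 1).foldl (fun acc index =>
    if PySem.List.pyGetD frequency_list index 0 = 1 then acc * 10 + index else acc) 0

-- ===== PORT B =====
def digits_of_number_alt (number : List Int) : Int :=
  ("123456789".toList).foldl (fun result d =>
    if number.any (fun n => decide (d ∈ PySem.Int.toChars (if n < 0 then -n else n))) then
      -- int(d): d is a decimal digit character, so ofStr? never misses; .getD 0 is unreachable
      result * 10 + (PySem.Int.ofStr? (String.ofList [d])).getD 0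
    else result) 0

-- ===== PRECONDITION & SPEC =====
def Spec_digits_of_number (number : List Int) (out : Int) : Prop := out = digits_of_number_alt number
instance (number : List Int) (out : Int) : Decidable (Spec_digits_of_number number out) := by unfold Spec_digits_of_number; infer_instance

-- ===== CLAIM (what is proved, stated in full; the proofs are below) =====
def Claim_equal_digits_of_number : Prop := ∀ (number : List Int), Dom_digits_of_number number → Spec_digits_of_number number (digits_of_number number)

-- ===== LEMMAS AND PROOFS =====

-- digit d (1..9) occurs in some element of the list
def pvPresent (number : List Int) (k : Nat) : Bool :=
  number.any (fun n => decide (k ∈ Nat.digits 10 n.natAbs))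

-- the canonical ascending list of present nonzero digits
def pvL (number : List Int) : List Nat :=
  (List.range' 1 9).filter (fun k => pvPresent number k)

lemma pv_abs_int (n : Int) : (if n < 0 then n * (-1) else n) = (n.natAbs : Int) := by
  split <;> omega

lemma pv_abs_int' (n : Int) : (if n < 0 then -n else n) = (n.natAbs : Int) := by
  split <;> omega

-- ---- A side ----

lemma pvAWhile_natStep (m : Nat) (freq : List Int) :
    pvAWhile (m : Int) freq =
      if 0 < m then pvAWhile ((m / 10 : Nat) : Int) (freq.set (m % 10) 1) else freq := by
  rw [pvAWhile]
  by_cases h : 0 < m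
  · rw [dif_pos (by exact_mod_cast h), if_pos h]
    have h1 : PySem.Int.floordiv (m : Int) 10 = ((m / 10 : Nat) : Int) := by
      exact_mod_cast PySem.Int.floordiv_natCast m 10
    have h2 : PySem.Int.mod (m : Int) 10 = ((m % 10 : Nat) : Int) := by
      exact_mod_cast PySem.Int.mod_natCast m 10
    rw [h1, h2, PySem.List.pySetD_natCast]
  · rw [dif_neg (by exact_mod_cast h), if_neg h]

lemma pvAWhile_length (m : Nat) : ∀ (freq : List Int),
    (pvAWhile (m : Int) freq).length = freq.length := by
  induction m using Nat.strong_induction_on with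
  | _ m ih =>
    intro freq
    rw [pvAWhile_natStep]
    by_cases h : 0 < m
    · simp only [h, if_true]
      rw [ih (m / 10) (by omega)]
      simp
    · simp [h]

lemma pvAWhile_getD (m : Nat) : ∀ (freq : List Int), freq.length = 10 → ∀ d : Nat, d < 10 →
    (pvAWhile (m : Int) freq).getD d 0 =
      if d ∈ Nat.digits 10 m then 1 else freq.getD d 0 := by
  induction m using Nat.strong_induction_on with
  | _ m ih =>
    intro freq hlen d hd
    rw [pvAWhile_natStep]
    by_cases h : 0 < m
    · simp only [h, if_true]
      rw [ih (m / 10) (by omega) (freq.set (m % 10) 1) (by simp [hlen]) d hd]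
      rw [Nat.digits_def' (by norm_num : 1 < 10) h]
      by_cases hmem : d ∈ Nat.digits 10 (m / 10)
      · simp [hmem]
      · by_cases hde : d = m % 10
        · subst hde
          simp [hmem, List.getD_eq_getElem?_getD, List.getElem?_set, hlen, hd]
        · simp [hmem, hde, List.getD_eq_getElem?_getD, List.getElem?_set,
                show ¬ (m % 10 = d) from fun h => hde h.symm]
    · have hm0 : m = 0 := by omega
      subst hm0
      simp [h]

lemma pv_foldA_getD (xs : List Int) : ∀ (freq : List Int), freq.length = 10 → ∀ d : Nat, d < 10 →
    (xs.foldl (fun f n => pvAWhile (if n < 0 then n * (-1) else n) f) freq).getD d 0 =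
      if pvPresent xs d then 1 else freq.getD d 0 := by
  induction xs with
  | nil => intro freq _ d _; simp [pvPresent]
  | cons x xs ih =>
    intro freq hlen d hd
    simp only [List.foldl_cons]
    rw [pv_abs_int x]
    rw [ih _ (by rw [pvAWhile_length]; exact hlen) d hd]
    rw [pvAWhile_getD x.natAbs freq hlen d hd]
    have hcons : pvPresent (x :: xs) d
        = (decide (d ∈ Nat.digits 10 x.natAbs) || pvPresent xs d) := by
      simp [pvPresent]
    by_cases h1 : pvPresent xs d = true
    · simp [hcons, h1]
    · by_cases h2 : d ∈ Nat.digits 10 x.natAbs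
      · simp [hcons, h1, h2]
      · simp [hcons, h1, h2]

lemma pv_A_eq (number : List Int) :
    digits_of_number number =
      (pvL number).foldl (fun (a : Int) (k : Nat) => a * 10 + (k : Int)) 0 := by
  unfold digits_of_number
  have hrange : PySem.List.pyRange 1 10 1 = List.map (fun k : Nat => (k : Int)) (List.range' 1 9) := by decide
  rw [hrange]
  rw [List.foldl_map]
  set F := number.foldl (fun f n => pvAWhile (if n < 0 then n * (-1) else n) f)
      [0, 0, 0, 0, 0, 0, 0, 0, 0, 0] with hF
  have hgetD : ∀ k ∈ List.range' 1 9, F.getD k 0 = if pvPresent number k then 1 else 0 := by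
    intro k hk
    have hk' : 1 ≤ k ∧ k < 10 := by simpa using List.mem_range'_1.1 hk
    rw [hF, pv_foldA_getD number _ rfl k hk'.2]
    obtain ⟨hk1, hk2⟩ := hk'
    have : ([0, 0, 0, 0, 0, 0, 0, 0, 0, 0] : List Int).getD k 0 = 0 := by
      interval_cases k <;> rfl
    rw [this]
  rw [PySem.List.foldl_ite_eq_foldl_filter
      (fun k : Nat => PySem.List.pyGetD F (k : Int) 0 = 1)
      (fun (a : Int) (k : Nat) => a * 10 + (k : Int)) (List.range' 1 9) 0]
  have hfilt : (List.range' 1 9).filter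
      (fun k : Nat => decide (PySem.List.pyGetD F (k : Int) 0 = 1)) = pvL number := by
    unfold pvL
    apply List.filter_congr
    intro k hk
    rw [show PySem.List.pyGetD F (k : Int) 0 = F.getD k 0 from PySem.List.pyGetD_natCast F k 0,
        hgetD k hk]
    by_cases h : pvPresent number k <;> simp [h]
  rw [hfilt]

-- ---- B side ----

lemma pv_toDigitsCore_eq (f : Nat) : ∀ n l, n ≠ 0 → n < f →
    Nat.toDigitsCore 10 f n l = ((Nat.digits 10 n).map Nat.digitChar).reverse ++ l := by
  induction f with
  | zero => intro n l _ h; omega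
  | succ f ih =>
    intro n l hn hf
    rw [Nat.toDigitsCore]
    rw [Nat.digits_def' (by norm_num : 1 < 10) (by omega)]
    by_cases h : n / 10 = 0
    · simp [h, Nat.digits_zero]
    · rw [if_neg h, ih (n / 10) _ h (by omega)]
      simp

lemma pv_toChars_eq (m : Nat) (hm : m ≠ 0) :
    PySem.Int.toChars (m : Int) = ((Nat.digits 10 m).map Nat.digitChar).reverse := by
  have : ¬ ((m : Int) < 0) := by omega
  simp only [PySem.Int.toChars, this, if_false, Int.toNat_natCast]
  rw [Nat.toDigits, pv_toDigitsCore_eq (m + 1) m [] hm (by omega)]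
  simp

lemma pv_digitChar_ne_zero {k : Nat} (hk : k < 10) : Nat.digitChar k = '0' ↔ k = 0 := by
  interval_cases k <;> decide

lemma pv_digitChar_inj : ∀ j, j < 10 → ∀ k, k < 10 → Nat.digitChar j = Nat.digitChar k → j = k := by
  decide

-- B's digit-major membership test agrees with pvPresent on digits 1..9
lemma pv_any_eq (number : List Int) (k : Nat) (hk1 : 1 ≤ k) (hk10 : k < 10) :
    (number.any (fun n =>
        decide (Nat.digitChar k ∈ PySem.Int.toChars (if n < 0 then -n else n))))
      = pvPresent number k := by
  unfold pvPresent
  congr 1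
  funext n
  rw [pv_abs_int' n]
  simp only [decide_eq_decide]
  by_cases hz : n.natAbs = 0
  · rw [hz]
    have h0 : PySem.Int.toChars ((0 : Nat) : Int) = ['0'] := by decide
    rw [h0]
    simp only [List.mem_singleton, Nat.digits_zero, List.not_mem_nil, iff_false]
    intro h
    exact absurd ((pv_digitChar_ne_zero hk10).1 h) (by omega)
  · rw [pv_toChars_eq _ hz]
    simp only [List.mem_reverse, List.mem_map]
    constructor
    · rintro ⟨j, hj, hje⟩
      have hj10 : j < 10 := Nat.digits_lt_base (by norm_num) hj
      rwa [pv_digitChar_inj j hj10 k hk10 hje] at hj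
    · intro h
      exact ⟨k, h, rfl⟩

lemma pv_B_eq (number : List Int) :
    digits_of_number_alt number =
      (pvL number).foldl (fun (a : Int) (k : Nat) => a * 10 + (k : Int)) 0 := by
  unfold digits_of_number_alt
  have hch : ("123456789".toList) = (List.range' 1 9).map Nat.digitChar := by decide
  rw [hch]
  rw [PySem.List.foldl_ite_eq_foldl_filter
      (fun d : Char => (number.any (fun n =>
        decide (d ∈ PySem.Int.toChars (if n < 0 then -n else n)))) = true)
      (fun (result : Int) (d : Char) =>
        result * 10 + (PySem.Int.ofStr? (String.ofList [d])).getD 0)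
      ((List.range' 1 9).map Nat.digitChar) 0]
  rw [List.filter_map, List.foldl_map]
  have hfilt : (List.range' 1 9).filter
      ((fun d : Char => decide ((number.any (fun n =>
          decide (d ∈ PySem.Int.toChars (if n < 0 then -n else n)))) = true)) ∘ Nat.digitChar)
      = pvL number := by
    unfold pvL
    apply List.filter_congr
    intro k hk
    have hk' : 1 ≤ k ∧ k < 10 := by simpa using List.mem_range'_1.1 hk
    simp only [Function.comp]
    rw [pv_any_eq number k hk'.1 hk'.2]
    by_cases h : pvPresent number k <;> simp [h]
  rw [hfilt]
  apply PySem.List.foldl_congr_mem'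
  intro k hk acc
  have hk' : 1 ≤ k ∧ k < 10 := by
    have := (List.mem_filter.1 hk).1
    simpa using List.mem_range'_1.1 this
  obtain ⟨h1, h2⟩ := hk'
  congr 1
  interval_cases k <;> decide

-- ===== VERDICT (by name: the statement is the Claim_ definition above) =====
theorem digits_of_number_spec : Claim_equal_digits_of_number := by
  intro number _
  unfold Spec_digits_of_number
  rw [pv_A_eq, pv_B_eq]
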